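-- pv_equiv track=rewrite | github.com/piyush01123/Daily-Coding-Problems | codejam/2018/saveUniverse.py | reduce_damage
-- ===== SOURCE A (Python) =====
-- def reduce_damage(A):
--     B = list(A)
--     i = len(B)-2
--     while i>=0:
--         if B[i] =='C' and B[i+1]=='S':
--             B[i]='S'
--             B[i+1]='C'
--             break
--         i-=1
--     return ''.join(B)
-- ===== SOURCE B (Python) =====
-- def reduce_damage(A):
--     # The last 'CS' in A is the first 'SC' in the reversed string:
--     # reverse, replace the first 'SC' by 'CS', reverse back.
--     R = A[::-1]
--     return R.replace('SC', 'CS', 1)[::-1]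
-- ===== Notes on version B (the rewrite author's own statement) =====
-- stated objective: alternative
-- what changed: Instead of scanning backward by index over a mutable char list and swapping in place, B reverses the string, replaces the first occurrence of the reversed pattern in one forward pass, and reverses back - no indices and no mutation.
import Mathlib
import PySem

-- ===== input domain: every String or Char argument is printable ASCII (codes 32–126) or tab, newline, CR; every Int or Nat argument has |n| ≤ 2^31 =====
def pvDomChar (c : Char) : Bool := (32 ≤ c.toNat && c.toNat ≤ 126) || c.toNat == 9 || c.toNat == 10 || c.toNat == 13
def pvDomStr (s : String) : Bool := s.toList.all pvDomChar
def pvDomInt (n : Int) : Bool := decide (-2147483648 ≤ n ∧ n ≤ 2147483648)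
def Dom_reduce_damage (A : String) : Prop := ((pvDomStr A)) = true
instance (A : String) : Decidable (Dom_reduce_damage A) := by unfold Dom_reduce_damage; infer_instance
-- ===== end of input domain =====

-- B replaces A's backward indexed scan with in-place swap by: reverse the string,
-- replace the FIRST 'SC' by 'CS' in one forward pass, reverse back (alternative decomposition; return value only).

-- ===== PORT A =====
-- the 'while i>=0' countdown loop: check position i, on a match swap-and-break, else i-1
def pvLoopA (B : List Char) (i : Nat) : List Char :=
  if B.getD i ' ' = 'C' ∧ B.getD (i+1) ' ' = 'S' then
    (B.set i 'S').set (i+1) 'C'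
  else
    match i with
    | 0 => B
    | j+1 => pvLoopA B j

def reduce_damage (A : String) : String :=
  let B := A.toList
  -- i = len(B)-2; the loop body runs only when i ≥ 0, i.e. when 2 ≤ len(B)
  if 2 ≤ B.length then String.ofList (pvLoopA B (B.length - 2)) else String.ofList B

-- ===== PORT B =====
-- R.replace('SC','CS',1): hand port (PySem.Str.replace has no count argument); exact for the
-- 2-character pattern: scan left to right, replace only the first occurrence, keep the rest.
def pvReplFirst : List Char → List Char
  | 'S' :: 'C' :: t => 'C' :: 'S' :: t
  | c :: t => c :: pvReplFirst t
  | [] => []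

def reduce_damage_alt (A : String) : String :=
  -- A[::-1] is List.reverse (exact: PySem.Str.slice?_none_none_neg_one)
  let R := A.toList.reverse
  String.ofList (pvReplFirst R).reverse

-- ===== PRECONDITION & SPEC =====
def Spec_reduce_damage (A : String) (out : String) : Prop := out = reduce_damage_alt A
instance (A : String) (out : String) : Decidable (Spec_reduce_damage A out) := by unfold Spec_reduce_damage; infer_instance

-- ===== CLAIM =====
def Claim_equal_reduce_damage : Prop := ∀ (A : String), Dom_reduce_damage A → Spec_reduce_damage A (reduce_damage A)

-- ===== LEMMAS AND PROOFS =====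

-- unfolding lemmas for pvReplFirst
lemma pvReplFirst_nil : pvReplFirst [] = [] := rfl

lemma pvReplFirst_match (t : List Char) : pvReplFirst ('S' :: 'C' :: t) = 'C' :: 'S' :: t := rfl

lemma pvReplFirst_singleton (c : Char) : pvReplFirst [c] = [c] := by
  rw [pvReplFirst.eq_def]
  split
  · rename_i heq; simp at heq
  · rename_i heq
    injection heq with h1 h2
    subst h1; subst h2
    rfl
  · rename_i heq; simp at heq

lemma pvReplFirst_cons_ne (a b : Char) (t : List Char) (h : ¬ (a = 'S' ∧ b = 'C')) :
    pvReplFirst (a :: b :: t) = a :: pvReplFirst (b :: t) := by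
  rw [pvReplFirst.eq_def]
  split
  · rename_i heq
    exact absurd (by injection heq with h1 h2; injection h2 with h2 _; exact ⟨h1, h2⟩) h
  · rename_i heq
    injection heq with h1 h2
    subst h1; subst h2
    rfl
  · rename_i heq; simp at heq

-- A's loop over init ++ [x] never looks at x while the scan index stays inside init
lemma pv_loop_shift (init : List Char) (x : Char) :
    ∀ j, j + 1 < init.length → pvLoopA (init ++ [x]) j = pvLoopA init j ++ [x] := by
  intro j
  induction j with
  | zero =>
    intro h
    rw [pvLoopA, pvLoopA]
    have h0 : (init ++ [x]).getD 0 ' ' = init.getD 0 ' ' := List.getD_append _ _ _ _ (by omega)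
    have h1 : (init ++ [x]).getD 1 ' ' = init.getD 1 ' ' := List.getD_append _ _ _ _ (by omega)
    rw [h0, h1]
    split
    · rw [List.set_append_left _ _ (by omega), List.set_append_left _ _ (by simp; omega)]
    · rfl
  | succ k ih =>
    intro h
    rw [pvLoopA, pvLoopA]
    have h0 : (init ++ [x]).getD (k+1) ' ' = init.getD (k+1) ' ' := List.getD_append _ _ _ _ (by omega)
    have h1 : (init ++ [x]).getD (k+1+1) ' ' = init.getD (k+1+1) ' ' := List.getD_append _ _ _ _ (by omega)
    rw [h0, h1]
    split
    · rw [List.set_append_left _ _ (by omega), List.set_append_left _ _ (by simp; omega)]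
    · exact ih (by omega)

-- the wrapped A-side body on a char list
def pvABody (l : List Char) : List Char :=
  if 2 ≤ l.length then pvLoopA l (l.length - 2) else l

-- main bridge: A's backward scan equals reverse ∘ first-replace ∘ reverse
lemma pv_bridge : ∀ (l : List Char), pvABody l = (pvReplFirst l.reverse).reverse := by
  intro l
  induction l using List.reverseRecOn with
  | nil => simp [pvABody, pvReplFirst_nil]
  | append_singleton init x ih =>
    rcases hinit : init.reverse with _ | ⟨y, s⟩
    · -- init = [], l = [x]
      have hnil : init = [] := by simpa using congrArg List.reverse hinit
      subst hnil
      simp [pvABody, pvReplFirst_singleton]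
    · -- init = s.reverse ++ [y]
      have hinit' : init = s.reverse ++ [y] := by
        have := congrArg List.reverse hinit; simpa using this
      have hlen : init.length = s.length + 1 := by rw [hinit']; simp
      have hrev : (init ++ [x]).reverse = x :: y :: s := by simp [hinit]
      by_cases hm : x = 'S' ∧ y = 'C'
      · -- match at the last pair
        obtain ⟨hx, hy⟩ := hm
        subst hx; subst hy
        rw [hrev, pvReplFirst_match]
        -- A side
        have h2 : 2 ≤ (init ++ ['S']).length := by simp [hlen]
        have hi : (init ++ ['S']).length - 2 = s.length := by simp [hlen]
        rw [pvABody, if_pos h2, hi, pvLoopA.eq_def]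
        have hg0 : (init ++ ['S']).getD s.length ' ' = 'C' := by
          rw [hinit', List.append_assoc, List.getD_append_right _ _ _ _ (by simp)]
          simp
        have hg1 : (init ++ ['S']).getD (s.length + 1) ' ' = 'S' := by
          rw [hinit', List.append_assoc, List.getD_append_right _ _ _ _ (by simp)]
          simp
        rw [if_pos ⟨hg0, hg1⟩]
        rw [hinit', List.append_assoc]
        rw [List.set_append_right _ _ (by simp), List.set_append_right _ _ (by simp)]
        simp
      · -- no match at the last pair
        rw [hrev, pvReplFirst_cons_ne x y s hm, ← hinit]
        simp only [List.reverse_cons]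
        rw [← ih]
        -- A side
        have h2 : 2 ≤ (init ++ [x]).length := by simp [hlen]
        have hi : (init ++ [x]).length - 2 = s.length := by simp [hlen]
        rw [pvABody, if_pos h2, hi, pvLoopA.eq_def]
        have hg0 : (init ++ [x]).getD s.length ' ' = y := by
          rw [hinit', List.append_assoc, List.getD_append_right _ _ _ _ (by simp)]
          simp
        have hg1 : (init ++ [x]).getD (s.length + 1) ' ' = x := by
          rw [hinit', List.append_assoc, List.getD_append_right _ _ _ _ (by simp)]
          simp
        have hnm : ¬ ((init ++ [x]).getD s.length ' ' = 'C' ∧ (init ++ [x]).getD (s.length + 1) ' ' = 'S') := by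
          rw [hg0, hg1]; intro hcs; exact hm ⟨hcs.2, hcs.1⟩
        rw [if_neg hnm]
        cases hs : s.length with
        | zero =>
          -- init.length = 1, scan index 0 already failed, return l unchanged
          show init ++ [x] = pvABody init ++ [x]
          rw [pvABody, if_neg (by omega)]
        | succ k =>
          -- recurse: index k stays inside init
          show pvLoopA (init ++ [x]) k = pvABody init ++ [x]
          rw [pv_loop_shift init x k (by omega)]
          rw [pvABody, if_pos (by omega)]
          congr 2
          omega

-- ===== VERDICT =====
theorem reduce_damage_spec : Claim_equal_reduce_damage := by
  intro A _
  show reduce_damage A = reduce_damage_alt A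
  have h := pv_bridge A.toList
  unfold pvABody at h
  by_cases hc : 2 ≤ A.toList.length
  · rw [if_pos hc] at h
    simp only [reduce_damage, reduce_damage_alt, if_pos hc]
    rw [h]
  · rw [if_neg hc] at h
    simp only [reduce_damage, reduce_damage_alt, if_neg hc]
    exact congrArg String.ofList h
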